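-- pv_equiv track=rewrite | github.com/cminst/tokenizersplus | run_spectralbpe_miniexp.py | token_domain
-- ===== SOURCE A (Python) =====
-- from typing import Dict, List, Tuple, Optional, Set, Any
--
-- def token_domain(token: str, stem_set: Set[str], suffix_set: Set[str]) -> int:
--     """
--     0 = other, 1 = stem-only, 2 = suffix-only, 3 = cross (both).
--     """
--     has_stem = any(ch in stem_set for ch in token)
--     has_suf = any(ch in suffix_set for ch in token)
--     if has_stem and has_suf:
--         return 3
--     if has_stem:
--         return 1
--     if has_suf:
--         return 2
--     return 0
-- ===== SOURCE B (Python) =====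
-- def token_domain(token, stem_set, suffix_set):
--     """0 = other, 1 = stem-only, 2 = suffix-only, 3 = cross (both)."""
--     has_stem = False
--     has_suf = False
--     for ch in token:
--         if not has_stem and ch in stem_set:
--             has_stem = True
--         if not has_suf and ch in suffix_set:
--             has_suf = True
--         if has_stem and has_suf:
--             break
--     return has_stem + 2 * has_suf
-- ===== Notes on version B (the rewrite author's own statement) =====
-- stated objective: alternative
-- what changed: One single pass over the token maintaining both flags with an early break once both are set, and the branch ladder replaced by the arithmetic combination has_stem + 2*has_suf, instead of two separate any() scans plus four-way if-chain.
import Mathlib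
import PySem

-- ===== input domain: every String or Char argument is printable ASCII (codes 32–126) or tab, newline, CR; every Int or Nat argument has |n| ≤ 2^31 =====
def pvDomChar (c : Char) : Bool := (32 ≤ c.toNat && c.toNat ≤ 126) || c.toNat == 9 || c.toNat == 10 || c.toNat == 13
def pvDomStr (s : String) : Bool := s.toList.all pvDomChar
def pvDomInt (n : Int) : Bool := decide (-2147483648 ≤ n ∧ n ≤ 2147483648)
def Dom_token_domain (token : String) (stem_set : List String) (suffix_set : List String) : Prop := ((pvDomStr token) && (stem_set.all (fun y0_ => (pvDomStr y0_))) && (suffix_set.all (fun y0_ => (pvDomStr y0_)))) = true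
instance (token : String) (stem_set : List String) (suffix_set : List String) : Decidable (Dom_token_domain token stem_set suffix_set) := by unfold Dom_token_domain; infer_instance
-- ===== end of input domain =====

-- B replaces A's two any() scans and if-ladder by one pass keeping both flags
-- (early break when both are set) and the arithmetic result has_stem + 2*has_suf
-- (objective: alternative decomposition; return value only, no side effects).

-- ===== PORT A =====
def token_domain (token : String) (stem_set : List String) (suffix_set : List String) : Int :=
  let has_stem := token.toList.any (fun ch => stem_set.contains (String.ofList [ch]))
  let has_suf := token.toList.any (fun ch => suffix_set.contains (String.ofList [ch]))
  if has_stem && has_suf then 3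
  else if has_stem then 1
  else if has_suf then 2
  else 0

-- ===== PORT B =====
-- the for-loop of Source B: walks the chars once, updating both flags, breaking when both are true
def tdLoop (stem_set suffix_set : List String) : List Char → Bool → Bool → Bool × Bool
  | [], has_stem, has_suf => (has_stem, has_suf)
  | ch :: rest, has_stem, has_suf =>
    let has_stem := if !has_stem && stem_set.contains (String.ofList [ch]) then true else has_stem
    let has_suf := if !has_suf && suffix_set.contains (String.ofList [ch]) then true else has_suf
    if has_stem && has_suf then (has_stem, has_suf)
    else tdLoop stem_set suffix_set rest has_stem has_suf

def token_domain_alt (token : String) (stem_set : List String) (suffix_set : List String) : Int :=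
  let r := tdLoop stem_set suffix_set token.toList false false
  (if r.1 then 1 else 0) + 2 * (if r.2 then 1 else 0)

-- ===== PRECONDITION & SPEC =====
def Spec_token_domain (token : String) (stem_set : List String) (suffix_set : List String) (out : Int) : Prop := out = token_domain_alt token stem_set suffix_set
instance (token : String) (stem_set : List String) (suffix_set : List String) (out : Int) : Decidable (Spec_token_domain token stem_set suffix_set out) := by unfold Spec_token_domain; infer_instance

-- ===== CLAIM (what is proved, stated in full; the proofs are below) =====
def Claim_equal_token_domain : Prop := ∀ (token : String) (stem_set : List String) (suffix_set : List String), Dom_token_domain token stem_set suffix_set → Spec_token_domain token stem_set suffix_set (token_domain token stem_set suffix_set)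

-- ===== LEMMAS AND PROOFS =====

-- the loop's result is the pair of "any" values, or-ed into the incoming flags
theorem tdLoop_eq (stem_set suffix_set : List String) (cs : List Char) :
    ∀ s f : Bool, tdLoop stem_set suffix_set cs s f =
      (s || cs.any (fun ch => stem_set.contains (String.ofList [ch])),
       f || cs.any (fun ch => suffix_set.contains (String.ofList [ch]))) := by
  induction cs with
  | nil => intro s f; simp [tdLoop]
  | cons ch rest ih =>
    intro s f
    simp only [tdLoop, List.any_cons]
    cases s <;> cases f <;>
      cases hs : stem_set.contains (String.ofList [ch]) <;>
      cases hf : suffix_set.contains (String.ofList [ch]) <;>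
      simp [ih]

-- ===== VERDICT (by name: the statement is the Claim_ definition above) =====
theorem token_domain_spec : Claim_equal_token_domain := by
  intro token stem_set suffix_set _
  unfold Spec_token_domain token_domain token_domain_alt
  rw [tdLoop_eq]
  cases hs : token.toList.any (fun ch => stem_set.contains (String.ofList [ch])) <;>
    cases hf : token.toList.any (fun ch => suffix_set.contains (String.ofList [ch])) <;>
    simp
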